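-- pv_equiv track=rewrite | github.com/Hojott/tira | vko3/samedist.py | find
-- ===== SOURCE A (Python) =====
-- def find(t):
--     indexes = dict()
--     for i, v in enumerate(t):
--         if not v in indexes:
--             indexes[v] = i
--
--     length = 0
--     for i, v in enumerate(reversed(t)):
--         nlen = len(t) - i - indexes[v] - 1
--         if nlen > length:
--             length = nlen
--
--     return length
-- ===== SOURCE B (Python) =====
-- def find(t):
--     first = {}
--     best = 0
--     for i, v in enumerate(t):
--         if v in first:
--             d = i - first[v]
--             if d > best:
--                 best = d
--         else:
--             first[v] = i
--     return best
-- ===== Notes on version B (the rewrite author's own statement) =====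
-- stated objective: simpler
-- what changed: Replaces A's two passes (build full first-index dict, then scan enumerate(reversed(t)) recomputing positions via len(t)-i-1) with a single forward pass that updates the running maximum distance i - first[v] as it builds the first-occurrence dict.
import Mathlib
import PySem

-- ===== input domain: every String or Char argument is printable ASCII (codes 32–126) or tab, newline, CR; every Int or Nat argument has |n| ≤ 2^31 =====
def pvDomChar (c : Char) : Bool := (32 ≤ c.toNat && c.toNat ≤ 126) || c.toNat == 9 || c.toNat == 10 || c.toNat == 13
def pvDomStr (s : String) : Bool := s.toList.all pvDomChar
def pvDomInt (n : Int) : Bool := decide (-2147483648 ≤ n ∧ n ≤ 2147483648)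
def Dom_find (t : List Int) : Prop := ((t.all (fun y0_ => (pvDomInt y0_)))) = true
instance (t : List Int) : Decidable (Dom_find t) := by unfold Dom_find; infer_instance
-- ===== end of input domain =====

-- B replaces A's two passes (first-index dict, then a scan over enumerate(reversed(t)))
-- with a single forward pass keeping the running maximum while building the dict (simpler; same O(n) cost).

-- ===== PORT A =====
-- A's first loop body: 'if not v in indexes: indexes[v] = i'
def findStepA (d : PySem.Dict Int Int) (p : Int × Int) : PySem.Dict Int Int :=
  if d.contains p.2 then d else d.insert p.2 p.1

def find (t : List Int) : Int :=
  let indexes := (PySem.List.enumerate t).foldl findStepA PySem.Dict.empty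
  (PySem.List.enumerate t.reverse).foldl
    (fun length p =>
      let nlen := (t.length : Int) - p.1 - indexes.getD p.2 0 - 1
      if nlen > length then nlen else length) 0

-- ===== PORT B =====
-- B's single loop body over state (first, best)
def findStepB (s : PySem.Dict Int Int × Int) (p : Int × Int) : PySem.Dict Int Int × Int :=
  if s.1.contains p.2 then
    let d := p.1 - s.1.getD p.2 0
    (s.1, if d > s.2 then d else s.2)
  else (s.1.insert p.2 p.1, s.2)

def find_alt (t : List Int) : Int :=
  ((PySem.List.enumerate t).foldl findStepB (PySem.Dict.empty, 0)).2

-- ===== PRECONDITION & SPEC =====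
def Spec_find (t : List Int) (out : Int) : Prop := out = find_alt t
instance (t : List Int) (out : Int) : Decidable (Spec_find t out) := by unfold Spec_find; infer_instance

-- ===== CLAIM (what is proved, stated in full; the proofs are below) =====
def Claim_equal_find : Prop := ∀ (t : List Int), Dom_find t → Spec_find t (find t)

-- ===== LEMMAS AND PROOFS =====

-- index (as Int) of the first occurrence of v in t (only used for v ∈ t)
def fi (t : List Int) (v : Int) : Int := ((t.idxOf v : Nat) : Int)

def dictOf (t : List Int) : PySem.Dict Int Int :=
  (PySem.List.enumerate t).foldl findStepA PySem.Dict.empty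

lemma idxOf_append_left {v : Int} (pre rest : List Int) (hv : v ∈ pre) :
    (pre ++ rest).idxOf v = pre.idxOf v := by
  induction pre with
  | nil => simp at hv
  | cons x p ih =>
    by_cases hx : x = v
    · simp [hx, List.idxOf_cons]
    · rcases List.mem_cons.mp hv with h | h
      · exact absurd h.symm hx
      · simp [List.idxOf_cons, hx, ih h]

lemma idxOf_append_head {v : Int} (pre rest : List Int) (hv : v ∉ pre) :
    (pre ++ v :: rest).idxOf v = pre.length := by
  induction pre with
  | nil => simp [List.idxOf_cons]
  | cons x p ih =>
    have hx : x ≠ v := by intro h; exact hv (by simp [h])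
    have hvp : v ∉ p := fun h => hv (by simp [h])
    simp [List.idxOf_cons, hx, ih hvp]

lemma getA (l : List Int) (s : Int) (d : PySem.Dict Int Int) (v : Int) :
    ((PySem.List.enumerate l s).foldl findStepA d).get? v =
      (d.get? v).or (if v ∈ l then some (s + (l.idxOf v : Int)) else none) := by
  induction l generalizing s d with
  | nil => simp [PySem.List.enumerate_nil]
  | cons x l ih =>
    rw [PySem.List.enumerate_cons, List.foldl_cons]
    by_cases hc : d.contains x
    · rw [show findStepA d (s, x) = d by simp [findStepA, hc], ih]
      have hds : (d.get? x).isSome := by rw [← PySem.Dict.contains_eq_isSome_get?]; exact hc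
      by_cases hvx : v = x
      · subst hvx
        rcases Option.isSome_iff_exists.mp hds with ⟨w, hw⟩
        simp [hw]
      · have hmem : v ∈ x :: l ↔ v ∈ l := by simp [hvx]
        have hbe : (x == v) = false := beq_eq_false_iff_ne.mpr (Ne.symm hvx)
        by_cases hm : v ∈ l
        · simp only [hmem.mpr hm, hm, if_true, List.idxOf_cons, hbe, cond_false]
          congr 2
          push_cast
          ring
        · simp [hm, hvx]
    · have hcf : d.contains x = false := by simpa using hc
      rw [show findStepA d (s, x) = d.insert x s by simp [findStepA, hcf], ih]
      have hdn : d.get? x = none := by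
        have h := PySem.Dict.contains_eq_isSome_get? (d := d) (k := x)
        rw [hcf] at h
        exact Option.not_isSome_iff_eq_none.mp (by rw [← h]; simp)
      by_cases hvx : v = x
      · subst hvx
        simp [PySem.Dict.get?_insert, hdn, List.idxOf_cons]
      · rw [show (d.insert x s).get? v = d.get? v by
          rw [PySem.Dict.get?_insert]; simp [hvx]]
        have hmem : v ∈ x :: l ↔ v ∈ l := by simp [hvx]
        have hbe : (x == v) = false := beq_eq_false_iff_ne.mpr (Ne.symm hvx)
        by_cases hm : v ∈ l
        · simp only [hmem.mpr hm, hm, if_true, List.idxOf_cons, hbe, cond_false]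
          congr 2
          push_cast
          ring
        · simp [hm, hvx]

lemma get_dictOf {t : List Int} {v : Int} (hv : v ∈ t) :
    (dictOf t).get? v = some (fi t v) := by
  rw [dictOf, getA]
  simp [hv, fi]

lemma getD_dictOf {t : List Int} {v : Int} (hv : v ∈ t) :
    (dictOf t).getD v 0 = fi t v := by
  rw [PySem.Dict.getD_eq_get?_getD, get_dictOf hv]
  rfl

lemma contains_dictOf (t : List Int) (v : Int) :
    (dictOf t).contains v = decide (v ∈ t) := by
  rw [PySem.Dict.contains_eq_isSome_get?, dictOf, getA]
  by_cases hv : v ∈ t <;> simp [hv]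

lemma dictOf_append_singleton (pre : List Int) (x : Int) :
    dictOf (pre ++ [x]) = findStepA (dictOf pre) ((pre.length : Int), x) := by
  simp [dictOf, PySem.List.enumerate_append, PySem.List.enumerate_cons,
    PySem.List.enumerate_nil]

lemma if_gt_eq_max (a b : Int) : (if b > a then b else a) = max a b := by
  rw [max_def]; split_ifs <;> omega

lemma foldl_max_init (l : List Int) (a b : Int) :
    l.foldl max (max a b) = max (l.foldl max a) b := by
  induction l generalizing a with
  | nil => rfl
  | cons x l ih =>
    simp only [List.foldl_cons]
    rw [max_right_comm, ih]

lemma foldl_max_reverse (l : List Int) (a : Int) :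
    l.reverse.foldl max a = l.foldl max a := by
  induction l generalizing a with
  | nil => rfl
  | cons x l ih =>
    simp only [List.reverse_cons, List.foldl_append, List.foldl_cons, List.foldl_nil, ih]
    exact (foldl_max_init l a x).symm

lemma A_as_max (t : List Int) :
    find t = ((PySem.List.enumerate t.reverse).map
      (fun p => ((t.length : Int) - p.1 - 1) - fi t p.2)).foldl max 0 := by
  rw [find, List.foldl_map]
  refine PySem.List.foldl_congr_mem _ _ _ _ (fun acc p hp => ?_)
  have hmem : p.2 ∈ t := by
    rcases (PySem.List.mem_enumerate_iff _ _ _).mp hp with ⟨k, hk, rfl⟩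
    exact List.mem_reverse.mp (List.getElem_mem hk)
  rw [show List.foldl findStepA PySem.Dict.empty (PySem.List.enumerate t) = dictOf t from rfl,
    getD_dictOf hmem, if_gt_eq_max]
  congr 1
  ring

lemma B_inv (rest pre : List Int) (b : Int) (hb : 0 ≤ b) :
    ((PySem.List.enumerate rest (pre.length : Int)).foldl findStepB (dictOf pre, b)).2
      = (PySem.List.enumerate rest (pre.length : Int)).foldl
          (fun acc p => max acc (p.1 - fi (pre ++ rest) p.2)) b := by
  induction rest generalizing pre b with
  | nil => simp [PySem.List.enumerate_nil]
  | cons x r ih =>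
    rw [PySem.List.enumerate_cons, List.foldl_cons, List.foldl_cons]
    by_cases hx : x ∈ pre
    · have hstep : findStepB (dictOf pre, b) ((pre.length : Int), x)
          = (dictOf pre, max b ((pre.length : Int) - (pre.idxOf x : Int))) := by
        simp only [findStepB, contains_dictOf, hx, decide_true, if_true]
        rw [getD_dictOf hx, if_gt_eq_max]
        rfl
      have hfi : fi (pre ++ x :: r) x = (pre.idxOf x : Int) := by
        rw [fi, show pre ++ x :: r = pre ++ [x] ++ r by simp,
          idxOf_append_left _ _ (by simp [hx]), idxOf_append_left _ _ hx]
      have hd : dictOf (pre ++ [x]) = dictOf pre := by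
        rw [dictOf_append_singleton, findStepA]
        simp [contains_dictOf, hx]
      have hb' : 0 ≤ max b ((pre.length : Int) - (pre.idxOf x : Int)) :=
        le_trans hb (le_max_left _ _)
      have := ih (pre ++ [x]) (max b ((pre.length : Int) - (pre.idxOf x : Int))) hb'
      rw [hd] at this
      simp only [List.length_append, List.length_cons, List.length_nil] at this
      rw [hstep, show ((pre.length : Nat) : Int) + 1 = (((pre.length + 1 : Nat)) : Int) by
        push_cast; ring, this, hfi]
      have hlists : pre ++ [x] ++ r = pre ++ x :: r := by simp
      simp [hlists]
    · have hstep : findStepB (dictOf pre, b) ((pre.length : Int), x)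
          = ((dictOf pre).insert x (pre.length : Int), b) := by
        simp [findStepB, contains_dictOf, hx]
      have hfi : fi (pre ++ x :: r) x = (pre.length : Int) := by
        rw [fi, idxOf_append_head _ _ hx]
      have hd : dictOf (pre ++ [x]) = (dictOf pre).insert x (pre.length : Int) := by
        rw [dictOf_append_singleton, findStepA]
        simp [contains_dictOf, hx]
      have := ih (pre ++ [x]) b hb
      rw [hd] at this
      simp only [List.length_append, List.length_cons, List.length_nil] at this
      rw [hstep, show ((pre.length : Nat) : Int) + 1 = (((pre.length + 1 : Nat)) : Int) by
        push_cast; ring, this, hfi]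
      have hlists : pre ++ [x] ++ r = pre ++ x :: r := by simp
      simp [hlists, max_eq_left hb]

lemma B_as_max (t : List Int) :
    find_alt t = ((PySem.List.enumerate t).map
      (fun p => p.1 - fi t p.2)).foldl max 0 := by
  have h := B_inv t [] 0 le_rfl
  simp only [List.length_nil, Nat.cast_zero, List.nil_append] at h
  rw [find_alt, show PySem.List.enumerate t = PySem.List.enumerate t 0 from rfl,
    show dictOf [] = PySem.Dict.empty from rfl] at *
  rw [h, List.foldl_map]

lemma map_enumerate_reverse (t : List Int) :
    ((PySem.List.enumerate t.reverse).map
      (fun p => ((t.length : Int) - p.1 - 1) - fi t p.2))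
      = (((PySem.List.enumerate t).map (fun p => p.1 - fi t p.2))).reverse := by
  apply List.ext_getElem
  · simp [PySem.List.length_enumerate]
  · intro k h1 h2
    have hk : k < t.length := by
      simpa [PySem.List.length_enumerate] using h1
    have hlen : ((PySem.List.enumerate t).map (fun p => p.1 - fi t p.2)).length
        = t.length := by simp [PySem.List.length_enumerate]
    simp only [List.getElem_map, List.getElem_reverse, hlen,
      PySem.List.getElem_enumerate]
    rw [show ((t.length - 1 - k : Nat) : Int) = (t.length : Int) - 1 - (k : Int) by omega]
    ring

-- ===== VERDICT (by name: the statement is the Claim_ definition above) =====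
theorem find_spec : Claim_equal_find := by
  intro t _
  show find t = find_alt t
  rw [A_as_max, B_as_max, map_enumerate_reverse, foldl_max_reverse]
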